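-- pv_equiv track=rewrite | github.com/DavidBartram/godbound-dice-roller | processing.py | gbtable
-- ===== SOURCE A (Python) =====
-- def gbtable(results):
--     tabletotal = 0
--     for result in results:
--         if result > 1:
--             if result <= 5:
--                 tabletotal = tabletotal + 1
--             elif result <= 9:
--                 tabletotal = tabletotal + 2
--             else:
--                 tabletotal = tabletotal + 4
--     return tabletotal
-- ===== SOURCE B (Python) =====
-- def gbtable(results):
--     # Staged counting: count how many results cross each threshold in
--     # separate passes, then combine the counts. Each crossing of 1 adds 1,
--     # each crossing of 5 adds 1 more, each crossing of 9 adds 2 more,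
--     # reproducing the 0/1/2/4 table.
--     over1 = len([r for r in results if r > 1])
--     over5 = len([r for r in results if r > 5])
--     over9 = len([r for r in results if r > 9])
--     return over1 + over5 + 2 * over9
-- ===== Notes on version B (the rewrite author's own statement) =====
-- stated objective: alternative
-- what changed: Replaces A's single pass with a nested if/elif score per element by three staged counting passes (counts of results above 1, above 5, above 9) combined at the end as over1 + over5 + 2*over9; no per-element score is ever computed.
import Mathlib
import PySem

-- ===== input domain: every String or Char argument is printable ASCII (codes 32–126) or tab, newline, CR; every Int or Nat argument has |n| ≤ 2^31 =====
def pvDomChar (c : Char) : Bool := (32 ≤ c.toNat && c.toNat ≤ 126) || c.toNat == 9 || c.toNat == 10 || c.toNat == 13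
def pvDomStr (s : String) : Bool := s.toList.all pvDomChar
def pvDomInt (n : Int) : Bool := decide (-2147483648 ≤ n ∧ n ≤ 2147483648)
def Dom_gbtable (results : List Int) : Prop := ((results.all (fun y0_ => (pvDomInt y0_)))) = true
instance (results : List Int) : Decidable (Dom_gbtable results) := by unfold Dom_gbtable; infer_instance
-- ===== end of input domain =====

-- ===== PORT A =====
-- header: B replaces A's single-pass nested if/elif scoring with three staged threshold-counting passes combined at the end (alternative decomposition).
def gbtable (results : List Int) : Int :=
  results.foldl (fun tabletotal result =>
    if result > 1 then
      if result ≤ 5 then tabletotal + 1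
      else if result ≤ 9 then tabletotal + 2
      else tabletotal + 4
    else tabletotal) 0

-- ===== PORT B =====
def gbtable_alt (results : List Int) : Int :=
  let over1 : Int := (results.filter (fun r => r > 1)).length
  let over5 : Int := (results.filter (fun r => r > 5)).length
  let over9 : Int := (results.filter (fun r => r > 9)).length
  over1 + over5 + 2 * over9

-- ===== PRECONDITION & SPEC =====
def Spec_gbtable (results : List Int) (out : Int) : Prop := out = gbtable_alt results
instance (results : List Int) (out : Int) : Decidable (Spec_gbtable results out) := by unfold Spec_gbtable; infer_instance

-- ===== CLAIM =====
def Claim_equal_gbtable : Prop := ∀ (results : List Int), Dom_gbtable results → Spec_gbtable results (gbtable results)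

-- ===== LEMMAS AND PROOFS =====
theorem gbtable_gen (results : List Int) (c : Int) :
    results.foldl (fun tabletotal result =>
      if result > 1 then
        if result ≤ 5 then tabletotal + 1
        else if result ≤ 9 then tabletotal + 2
        else tabletotal + 4
      else tabletotal) c = c + gbtable_alt results := by
  induction results generalizing c with
  | nil => simp [gbtable_alt]
  | cons r rs ih =>
    simp only [List.foldl_cons, gbtable_alt, List.filter_cons] at *
    rw [ih]
    split_ifs <;> simp_all <;> omega

-- ===== VERDICT =====
theorem gbtable_spec : Claim_equal_gbtable := by
  intro results _
  unfold Spec_gbtable gbtable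
  rw [gbtable_gen]
  simp
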